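-- pv_equiv track=rewrite | github.com/lxucs/woam | span_util.py | remove_overlap_batch
-- ===== SOURCE A (Python) =====
-- def remove_overlap_batch(candidate_starts, candidate_ends, selected_starts, selected_ends, allow_nested=False):
--     """ Remove overlap candidates against selected spans (>=); assuming no overlapping in selected. """
--     if not candidate_starts or not selected_starts:
--         return candidate_starts, candidate_ends
--
--     selected_token_idx = set()  # For any overlap
--     start_to_max_end, end_to_min_start = {}, {}  # For cross-overlap
--     toki2selectedi = [-1] * (max(max(candidate_ends), max(selected_ends)) + 1)  # For cross-overlap
--     for selected_i, (i_s, i_e) in enumerate(zip(selected_starts, selected_ends)):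
--         if allow_nested:
--             max_end = start_to_max_end.get(i_s, -1)
--             if i_e > max_end:
--                 start_to_max_end[i_s] = i_e
--             min_start = end_to_min_start.get(i_e, -1)
--             if min_start == -1 or i_s < min_start:
--                 end_to_min_start[i_e] = i_s
--             for tok_i in range(i_s, i_e + 1):
--                 assert toki2selectedi[tok_i] == -1, 'Initial seeds have overlaps'
--                 toki2selectedi[tok_i] = selected_i
--         else:
--             selected_token_idx.update(range(i_s, i_e + 1))
--
--     filtered_starts, filtered_ends = [], []
--     for i_s, i_e in zip(candidate_starts, candidate_ends):
--         if allow_nested: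
--             if start_to_max_end.get(i_s, -1) == i_e and end_to_min_start.get(i_e, -1) == i_s:  # Allow exact
--                 pass
--             cross_overlap = False
--             for tok_i in range(i_s, i_e + 1):
--                 max_end = start_to_max_end.get(tok_i, -1)
--                 if tok_i > i_s and max_end > i_e:
--                     cross_overlap = True
--                     break
--                 min_start = end_to_min_start.get(tok_i, -1)
--                 if tok_i < i_e and 0 <= min_start < i_s:
--                     cross_overlap = True
--                     break
--             if not cross_overlap:
--                 # Do not allow candidate < selected
--                 unique_selected_i = set(toki2selectedi[i_s: i_e + 1])
--                 if len(unique_selected_i) == 1 and toki2selectedi[i_s] != -1: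
--                     if (i_s > 0 and toki2selectedi[i_s - 1] == toki2selectedi[i_s]) or \
--                             (i_e < len(toki2selectedi) - 1 and toki2selectedi[i_e + 1] == toki2selectedi[i_e]):
--                         cross_overlap = True
--             if not cross_overlap:
--                 filtered_starts.append(i_s)
--                 filtered_ends.append(i_e)
--         else:
--             overlap = False
--             for tok_i in range(i_s, i_e + 1):
--                 if tok_i in selected_token_idx:
--                     overlap = True
--                     break
--             if not overlap:
--                 filtered_starts.append(i_s)
--                 filtered_ends.append(i_e)
--
--     return filtered_starts, filtered_ends
-- ===== SOURCE B (Python) =====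
-- def remove_overlap_batch(candidate_starts, candidate_ends, selected_starts, selected_ends, allow_nested=False):
--     """ Remove overlap candidates against selected spans by direct interval arithmetic. """
--     if not candidate_starts or not selected_starts:
--         return candidate_starts, candidate_ends
--
--     selected = list(zip(selected_starts, selected_ends))
--     filtered_starts, filtered_ends = [], []
--     for c_s, c_e in zip(candidate_starts, candidate_ends):
--         if allow_nested:
--             drop = any(c_s < s <= c_e < e for s, e in selected) or \
--                    any(s < c_s <= e < c_e for s, e in selected) or \
--                    any(s <= c_s <= c_e <= e and (s < c_s or c_e < e) for s, e in selected)
--         else: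
--             drop = any(s <= c_e and c_s <= e and s <= e and c_s <= c_e for s, e in selected)
--         if not drop:
--             filtered_starts.append(c_s)
--             filtered_ends.append(c_e)
--     return filtered_starts, filtered_ends
-- ===== Notes on version B (the rewrite author's own statement) =====
-- stated objective: alternative
-- what changed: B replaces A's precomputed token-level structures (a covered-token set, start->max-end / end->min-start dicts and a token->selected-index array scanned per token of each candidate) by direct interval arithmetic: each candidate is compared against each selected span with O(1) closed-form overlap/cross-overlap/proper-nesting tests, so no per-token loops and no auxiliary structures exist.
-- outside the precondition, e.g. on remove_overlap_batch([-3, -4], [-2, 3], [0], [6], True): A returns ([], []), B returns ([-3], [-2])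
import Mathlib
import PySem

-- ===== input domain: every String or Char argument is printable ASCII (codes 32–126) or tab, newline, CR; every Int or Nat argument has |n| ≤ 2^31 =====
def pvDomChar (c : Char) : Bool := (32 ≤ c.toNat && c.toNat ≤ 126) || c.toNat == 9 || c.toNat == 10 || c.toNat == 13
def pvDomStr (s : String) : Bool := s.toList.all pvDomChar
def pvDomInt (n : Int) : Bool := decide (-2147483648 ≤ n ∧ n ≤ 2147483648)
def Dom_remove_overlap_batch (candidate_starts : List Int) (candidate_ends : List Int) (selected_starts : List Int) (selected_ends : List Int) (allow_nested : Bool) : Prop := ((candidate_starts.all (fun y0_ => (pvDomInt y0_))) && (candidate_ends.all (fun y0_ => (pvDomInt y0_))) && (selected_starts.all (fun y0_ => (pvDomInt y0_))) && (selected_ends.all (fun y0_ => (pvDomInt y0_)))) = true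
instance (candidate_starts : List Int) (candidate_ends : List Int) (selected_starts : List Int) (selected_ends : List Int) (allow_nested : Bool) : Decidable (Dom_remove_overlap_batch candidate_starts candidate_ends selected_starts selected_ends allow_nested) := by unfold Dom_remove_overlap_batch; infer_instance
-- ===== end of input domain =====

-- B replaces A's token-level auxiliary structures by per-pair interval arithmetic (alternative
-- decomposition, same results on Pre_); return value only, neither version mutates its arguments.

-- ===== PORT A =====
-- One pass of A's selected-spans loop, component by component (the Python loop updates the four
-- structures in one body; each update reads only its own structure, written here per component).
def pvAStepSME (an : Bool) (d : PySem.Dict Int Int) (q : Int × Int) : PySem.Dict Int Int :=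
  if an then (if q.2 > d.getD q.1 (-1) then d.insert q.1 q.2 else d) else d

def pvAStepEMS (an : Bool) (d : PySem.Dict Int Int) (q : Int × Int) : PySem.Dict Int Int :=
  if an then (let ms := d.getD q.2 (-1); if ms = -1 ∨ q.1 < ms then d.insert q.2 q.1 else d) else d

def pvAStepSel (an : Bool) (s : PySem.Set Int) (q : Int × Int) : PySem.Set Int :=
  if an then s else PySem.Set.update s (PySem.List.pyRange q.1 (q.2 + 1) 1)

-- the `assert toki2selectedi[tok_i] == -1` raises exactly where Pre_ excludes; the write itself:
def pvAStepToki (an : Bool) (t : List Int) (p : Int × (Int × Int)) : List Int :=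
  if an then (PySem.List.pyRange p.2.1 (p.2.2 + 1) 1).foldl
      (fun t tok => PySem.List.pySetD t tok p.1) t
  else t

-- A's per-candidate test (the loops with `break` compute exactly `List.any`; Python's dead
-- `if start_to_max_end.get(i_s, -1) == i_e and ...: pass` has no effect and is not repeated here;
-- pyGet? … |>.getD (-2) is Python's toki2selectedi[·], in range wherever A returns).
def pvAKeep (an : Bool) (s2m e2m : PySem.Dict Int Int) (selSet : PySem.Set Int)
    (toki : List Int) (i_s i_e : Int) : Bool :=
  if an then
    let cross1 := (PySem.List.pyRange i_s (i_e + 1) 1).any (fun tok =>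
      (decide (tok > i_s) && decide (s2m.getD tok (-1) > i_e)) ||
      (decide (tok < i_e) && (decide (0 ≤ e2m.getD tok (-1)) && decide (e2m.getD tok (-1) < i_s))))
    let cross :=
      if cross1 then true
      else
        let uniq := PySem.Set.ofList (PySem.List.slice toki (some i_s) (some (i_e + 1)))
        if uniq.length = 1 ∧ (PySem.List.pyGet? toki i_s).getD (-2) ≠ -1 then
          (decide (i_s > 0) &&
            decide ((PySem.List.pyGet? toki (i_s - 1)).getD (-2) = (PySem.List.pyGet? toki i_s).getD (-2))) ||
          (decide (i_e < PySem.List.len toki - 1) &&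
            decide ((PySem.List.pyGet? toki (i_e + 1)).getD (-2) = (PySem.List.pyGet? toki i_e).getD (-2)))
        else false
    !cross
  else
    !((PySem.List.pyRange i_s (i_e + 1) 1).any (fun tok => PySem.Set.contains selSet tok))

def remove_overlap_batch (candidate_starts : List Int) (candidate_ends : List Int) (selected_starts : List Int) (selected_ends : List Int) (allow_nested : Bool) : List Int × List Int :=
  if candidate_starts = [] ∨ selected_starts = [] then (candidate_starts, candidate_ends)
  else
    -- max(max(candidate_ends), max(selected_ends)); max? = none is Python's ValueError, excluded by Pre_
    let maxAll : Int := max ((PySem.List.max? candidate_ends id).getD 0) ((PySem.List.max? selected_ends id).getD 0)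
    let toki0 : List Int := List.replicate (maxAll + 1).toNat (-1)
    let st := (PySem.List.enumerate (List.zip selected_starts selected_ends) 0).foldl
      (fun st p => (pvAStepSME allow_nested st.1 p.2, pvAStepEMS allow_nested st.2.1 p.2,
                    pvAStepSel allow_nested st.2.2.1 p.2, pvAStepToki allow_nested st.2.2.2 p))
      (PySem.Dict.empty, PySem.Dict.empty, PySem.Set.empty, toki0)
    (List.zip candidate_starts candidate_ends).foldl
      (fun acc p => if pvAKeep allow_nested st.1 st.2.1 st.2.2.1 st.2.2.2 p.1 p.2
        then (acc.1 ++ [p.1], acc.2 ++ [p.2]) else acc)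
      ([], [])

-- ===== PORT B =====
def remove_overlap_batch_alt (candidate_starts : List Int) (candidate_ends : List Int) (selected_starts : List Int) (selected_ends : List Int) (allow_nested : Bool) : List Int × List Int :=
  if candidate_starts = [] ∨ selected_starts = [] then (candidate_starts, candidate_ends)
  else
    let selected := List.zip selected_starts selected_ends
    (List.zip candidate_starts candidate_ends).foldl
      (fun acc p =>
        let c_s := p.1; let c_e := p.2
        let drop :=
          if allow_nested then
            selected.any (fun q => decide (c_s < q.1 ∧ q.1 ≤ c_e ∧ c_e < q.2)) ||
            selected.any (fun q => decide (q.1 < c_s ∧ c_s ≤ q.2 ∧ q.2 < c_e)) ||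
            selected.any (fun q => decide (q.1 ≤ c_s ∧ c_s ≤ c_e ∧ c_e ≤ q.2 ∧ (q.1 < c_s ∨ c_e < q.2)))
          else
            selected.any (fun q => decide (q.1 ≤ c_e ∧ c_s ≤ q.2 ∧ q.1 ≤ q.2 ∧ c_s ≤ c_e))
        if !drop then (acc.1 ++ [c_s], acc.2 ++ [c_e]) else acc)
      ([], [])

-- ===== PRECONDITION & SPEC =====
-- Pre_ excludes (besides the empty-ends inputs, where A raises ValueError on max(), and the
-- nested-mode inputs with overlapping selected spans, where A's assert raises) the nested-mode
-- inputs containing a negative token index: there A either raises IndexError or silently filters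
-- through Python's negative-index/slice wraparound into toki2selectedi, an accidental value.
def Pre_remove_overlap_batch (candidate_starts : List Int) (candidate_ends : List Int) (selected_starts : List Int) (selected_ends : List Int) (allow_nested : Bool) : Prop :=
  (candidate_starts = [] ∨ selected_starts = []) ∨
  (candidate_ends ≠ [] ∧ selected_ends ≠ [] ∧
    (allow_nested = true →
      (∀ x ∈ candidate_starts, 0 ≤ x) ∧ (∀ x ∈ candidate_ends, 0 ≤ x) ∧
      (∀ x ∈ selected_starts, 0 ≤ x) ∧ (∀ x ∈ selected_ends, 0 ≤ x) ∧
      (List.zip selected_starts selected_ends).Pairwise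
        (fun p q => p.2 < q.1 ∨ q.2 < p.1 ∨ p.2 < p.1 ∨ q.2 < q.1)))
instance (candidate_starts : List Int) (candidate_ends : List Int) (selected_starts : List Int) (selected_ends : List Int) (allow_nested : Bool) : Decidable (Pre_remove_overlap_batch candidate_starts candidate_ends selected_starts selected_ends allow_nested) := by unfold Pre_remove_overlap_batch; infer_instance

def pvWitness_remove_overlap_batch : List Int × List Int × List Int × List Int × Bool :=
  ([0, 2], [1, 5], [2], [3], true)

def Spec_remove_overlap_batch (candidate_starts : List Int) (candidate_ends : List Int) (selected_starts : List Int) (selected_ends : List Int) (allow_nested : Bool) (out : List Int × List Int) : Prop := out = remove_overlap_batch_alt candidate_starts candidate_ends selected_starts selected_ends allow_nested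
instance (candidate_starts : List Int) (candidate_ends : List Int) (selected_starts : List Int) (selected_ends : List Int) (allow_nested : Bool) (out : List Int × List Int) : Decidable (Spec_remove_overlap_batch candidate_starts candidate_ends selected_starts selected_ends allow_nested out) := by unfold Spec_remove_overlap_batch; infer_instance

-- ===== CLAIM (what is proved, stated in full; the proofs are below) =====
def Claim_equal_remove_overlap_batch : Prop := ∀ (candidate_starts : List Int) (candidate_ends : List Int) (selected_starts : List Int) (selected_ends : List Int) (allow_nested : Bool), Dom_remove_overlap_batch candidate_starts candidate_ends selected_starts selected_ends allow_nested → Pre_remove_overlap_batch candidate_starts candidate_ends selected_starts selected_ends allow_nested → Spec_remove_overlap_batch candidate_starts candidate_ends selected_starts selected_ends allow_nested (remove_overlap_batch candidate_starts candidate_ends selected_starts selected_ends allow_nested)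

-- ===== LEMMAS AND PROOFS =====

theorem pv_witness_ok :
    Dom_remove_overlap_batch (pvWitness_remove_overlap_batch.1) (pvWitness_remove_overlap_batch.2.1) (pvWitness_remove_overlap_batch.2.2.1) (pvWitness_remove_overlap_batch.2.2.2.1) (pvWitness_remove_overlap_batch.2.2.2.2) ∧
    Pre_remove_overlap_batch (pvWitness_remove_overlap_batch.1) (pvWitness_remove_overlap_batch.2.1) (pvWitness_remove_overlap_batch.2.2.1) (pvWitness_remove_overlap_batch.2.2.2.1) (pvWitness_remove_overlap_batch.2.2.2.2) := by
  constructor <;> decide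

-- membership in the covered-token set A builds for allow_nested=False
theorem pv_mem_selSet (l : List (Int × Int)) (s0 : PySem.Set Int) (x : Int) :
    (x ∈ l.foldl (fun s q => PySem.Set.update s (PySem.List.pyRange q.1 (q.2 + 1) 1)) s0) ↔
      x ∈ s0 ∨ ∃ q ∈ l, q.1 ≤ x ∧ x ≤ q.2 := by
  induction l generalizing s0 with
  | nil => simp
  | cons q rest ih =>
    simp only [List.foldl_cons, ih, PySem.Set.mem_update, PySem.List.mem_pyRange_one]
    constructor
    · rintro (⟨h | h⟩ | ⟨r, hr, h1, h2⟩)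
      · exact Or.inl h
      · exact Or.inr ⟨q, by simp, by omega⟩
      · exact Or.inr ⟨r, by simp [hr], h1, h2⟩
    · rintro (h | ⟨r, hr, h1, h2⟩)
      · exact Or.inl (Or.inl h)
      · rcases List.mem_cons.mp hr with rfl | hr
        · exact Or.inl (Or.inr (by omega))
        · exact Or.inr ⟨r, hr, h1, h2⟩

-- start->max-end dict: its getD is the running max of the ends recorded at that key
theorem pv_dmax_char (l : List (Int × Int)) (d : PySem.Dict Int Int) (x K : Int) :
    K < ((l.foldl (fun d q => if q.2 > d.getD q.1 (-1) then d.insert q.1 q.2 else d) d).getD x (-1)) ↔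
      K < d.getD x (-1) ∨ ∃ q ∈ l, q.1 = x ∧ K < q.2 := by
  induction l generalizing d with
  | nil => simp
  | cons q rest ih =>
    simp only [List.foldl_cons, ih]
    constructor
    · rintro (h | ⟨r, hr, h1, h2⟩)
      · by_cases hq : q.2 > d.getD q.1 (-1)
        · simp only [if_pos hq, PySem.Dict.getD_insert] at h
          by_cases hx : x = q.1
          · subst hx
            simp only [] at h
            exact Or.inr ⟨q, by simp, rfl, h⟩
          · simp only [if_neg hx] at h
            exact Or.inl h
        · simp only [if_neg hq] at h
          exact Or.inl h
      · exact Or.inr ⟨r, by simp [hr], h1, h2⟩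
    · rintro (h | ⟨r, hr, h1, h2⟩)
      · left
        by_cases hq : q.2 > d.getD q.1 (-1)
        · simp only [if_pos hq, PySem.Dict.getD_insert]
          by_cases hx : x = q.1
          · subst hx; simp only []; omega
          · simp only [if_neg hx]; exact h
        · simp only [if_neg hq]; exact h
      · rcases List.mem_cons.mp hr with rfl | hr
        · left
          subst h1
          by_cases hq : r.2 > d.getD r.1 (-1)
          · simp only [if_pos hq, PySem.Dict.getD_insert]; exact h2
          · simp only [if_neg hq]; omega
        · exact Or.inr ⟨r, hr, h1, h2⟩

-- end->min-start dict (A marks "absent" with -1; all recorded starts are ≥ 0 under Pre_)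
theorem pv_dmin_char (l : List (Int × Int)) (d : PySem.Dict Int Int) (y K : Int)
    (hl : ∀ q ∈ l, 0 ≤ q.1) (hd : ∀ z, -1 ≤ d.getD z (-1)) :
    (0 ≤ ((l.foldl (fun d q => if d.getD q.2 (-1) = -1 ∨ q.1 < d.getD q.2 (-1) then d.insert q.2 q.1 else d) d).getD y (-1)) ∧
     ((l.foldl (fun d q => if d.getD q.2 (-1) = -1 ∨ q.1 < d.getD q.2 (-1) then d.insert q.2 q.1 else d) d).getD y (-1)) < K) ↔
      ((0 ≤ d.getD y (-1) ∧ d.getD y (-1) < K) ∨ ∃ q ∈ l, q.2 = y ∧ q.1 < K) := by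
  induction l generalizing d with
  | nil => simp
  | cons q rest ih =>
    have hq0 : 0 ≤ q.1 := hl q (by simp)
    have hrest : ∀ r ∈ rest, 0 ≤ r.1 := fun r hr => hl r (by simp [hr])
    by_cases hc : d.getD q.2 (-1) = -1 ∨ q.1 < d.getD q.2 (-1)
    · have hd' : ∀ z, -1 ≤ (d.insert q.2 q.1).getD z (-1) := by
        intro z
        rw [PySem.Dict.getD_insert]
        split
        · omega
        · exact hd z
      simp only [List.foldl_cons, if_pos hc]
      rw [ih _ hrest hd']
      have hdq := hd q.2
      constructor
      · rintro (h | ⟨r, hr, h1, h2⟩)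
        · rw [PySem.Dict.getD_insert] at h
          by_cases hy : y = q.2
          · subst hy; simp only [] at h
            exact Or.inr ⟨q, by simp, rfl, h.2⟩
          · simp only [if_neg hy] at h; exact Or.inl h
        · exact Or.inr ⟨r, by simp [hr], h1, h2⟩
      · rintro (h | ⟨r, hr, h1, h2⟩)
        · left
          rw [PySem.Dict.getD_insert]
          by_cases hy : y = q.2
          · subst hy; simp only []; omega
          · simp only [if_neg hy]; exact h
        · rcases List.mem_cons.mp hr with rfl | hr
          · left
            subst h1
            rw [PySem.Dict.getD_insert, if_pos rfl]
            omega
          · exact Or.inr ⟨r, hr, h1, h2⟩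
    · simp only [List.foldl_cons, if_neg hc]
      rw [ih _ hrest hd]
      have hdq := hd q.2
      constructor
      · rintro (h | ⟨r, hr, h1, h2⟩)
        · exact Or.inl h
        · exact Or.inr ⟨r, by simp [hr], h1, h2⟩
      · rintro (h | ⟨r, hr, h1, h2⟩)
        · exact Or.inl h
        · rcases List.mem_cons.mp hr with rfl | hr
          · left
            subst h1
            constructor <;> omega
          · exact Or.inr ⟨r, hr, h1, h2⟩

-- max(xs) on a nonempty list returns a value
theorem pv_max?_isSome (xs : List Int) (h : xs ≠ []) : ∃ m, PySem.List.max? xs id = some m := by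
  cases xs with
  | nil => exact absurd rfl h
  | cons a rest =>
    clear h
    unfold PySem.List.max?
    simp only [List.foldl_cons]
    induction rest generalizing a with
    | nil => exact ⟨a, rfl⟩
    | cons b rest ih =>
      simp only [List.foldl_cons]
      split
      · exact ih b
      · exact ih a

-- length is preserved by the token-array write loop
theorem pv_len_write (L : List Int) (i : Int) : ∀ t0 : List Int,
    (L.foldl (fun t tok => PySem.List.pySetD t tok i) t0).length = t0.length := by
  induction L with
  | nil => intro t0; rfl
  | cons a rest ih =>
    intro t0
    simp only [List.foldl_cons, ih, PySem.List.length_pySetD]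

-- writing value i at every index of [a, a+n) : reads inside become i, others are unchanged
theorem pv_write_get (i : Int) : ∀ (n : Nat) (a : Int), 0 ≤ a → ∀ (t0 : List Int) (t : Int),
    0 ≤ t → t < (t0.length : Int) →
    PySem.List.pyGet? ((PySem.List.pyRange a (a + (n : Int)) 1).foldl (fun t tok => PySem.List.pySetD t tok i) t0) t =
      if a ≤ t ∧ t < a + (n : Int) then some i else PySem.List.pyGet? t0 t := by
  intro n
  induction n with
  | zero =>
    intro a ha t0 t ht0 htl
    rw [PySem.List.pyRange_one_eq_nil (by omega)]
    simp only [List.foldl_nil]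
    rw [if_neg (by omega)]
  | succ n ih =>
    intro a ha t0 t ht0 htl
    have hcast : a + ((n + 1 : Nat) : Int) = (a + 1) + (n : Int) := by push_cast; ring
    rw [hcast, PySem.List.pyRange_one_cons (by omega), List.foldl_cons]
    rw [ih (a + 1) (by omega) _ t ht0 (by rw [PySem.List.length_pySetD]; exact htl)]
    rw [PySem.List.pySetD_of_nonneg _ _ ha, PySem.List.pyGet?_of_nonneg _ ht0,
        PySem.List.pyGet?_of_nonneg t0 ht0, List.getElem?_set]
    by_cases h1 : a + 1 ≤ t ∧ t < a + 1 + (n : Int)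
    · rw [if_pos h1, if_pos (by omega)]
    · rw [if_neg h1]
      by_cases h2 : t = a
      · subst h2
        rw [if_pos (by omega), if_pos (by omega), if_pos (by omega)]
      · rw [if_neg (by omega), if_neg (by omega)]

-- length is preserved by the whole selected-spans loop over the token array
theorem pv_len_toki (lp : List (Int × (Int × Int))) : ∀ t0 : List Int,
    (lp.foldl (fun tk p => pvAStepToki true tk p) t0).length = t0.length := by
  induction lp with
  | nil => intro t0; rfl
  | cons p rest ih =>
    intro t0
    simp only [List.foldl_cons, ih]
    simp only [pvAStepToki, if_true]
    exact pv_len_write _ _ _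

-- the token->selected-index array: entry t is the index of the (unique) selected span covering t
theorem pv_toki_char (l : List (Int × Int)) : ∀ (s0 : Int) (t0 : List Int) (t : Int),
    0 ≤ t → t < (t0.length : Int) → (∀ q ∈ l, 0 ≤ q.1) →
    l.Pairwise (fun p q => ∀ u : Int, ¬(p.1 ≤ u ∧ u ≤ p.2 ∧ q.1 ≤ u ∧ u ≤ q.2)) →
    PySem.List.pyGet? ((PySem.List.enumerate l s0).foldl (fun tk p => pvAStepToki true tk p) t0) t =
      (match l.findIdx? (fun q => decide (q.1 ≤ t ∧ t ≤ q.2)) with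
       | some k => some (s0 + (k : Int))
       | none => PySem.List.pyGet? t0 t) := by
  induction l with
  | nil =>
    intro s0 t0 t _ _ _ _
    simp [PySem.List.enumerate]
  | cons q rest ih =>
    intro s0 t0 t ht0 htl hnn hpw
    rw [PySem.List.enumerate_cons, List.foldl_cons]
    have hq1 : 0 ≤ q.1 := hnn q (by simp)
    have hstep : pvAStepToki true t0 (s0, q) =
        (PySem.List.pyRange q.1 (q.2 + 1) 1).foldl (fun t tok => PySem.List.pySetD t tok s0) t0 := by
      simp [pvAStepToki]
    have hget : PySem.List.pyGet? ((PySem.List.pyRange q.1 (q.2 + 1) 1).foldl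
        (fun t tok => PySem.List.pySetD t tok s0) t0) t =
        if q.1 ≤ t ∧ t ≤ q.2 then some s0 else PySem.List.pyGet? t0 t := by
      by_cases hqe : q.1 ≤ q.2
      · rw [show (q.2 + 1) = q.1 + (((q.2 + 1 - q.1).toNat : Nat) : Int) from by omega,
          pv_write_get s0 _ q.1 hq1 t0 t ht0 htl,
          if_congr (show (q.1 ≤ t ∧ t < q.1 + (((q.2 + 1 - q.1).toNat : Nat) : Int)) ↔ (q.1 ≤ t ∧ t ≤ q.2) by omega) rfl rfl]
      · rw [PySem.List.pyRange_one_eq_nil (by omega)]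
        simp only [List.foldl_nil]
        rw [if_neg (by omega)]
    rw [hstep]
    rw [ih (s0 + 1) _ t ht0 (by rw [pv_len_write]; exact htl)
        (fun r hr => hnn r (by simp [hr])) (List.pairwise_cons.mp hpw).2]
    rw [List.findIdx?_cons]
    by_cases hcov : q.1 ≤ t ∧ t ≤ q.2
    · have hrest : rest.findIdx? (fun q => decide (q.1 ≤ t ∧ t ≤ q.2)) = none := by
        rw [List.findIdx?_eq_none_iff]
        intro r hr
        have := (List.pairwise_cons.mp hpw).1 r hr t
        simp only [decide_eq_false_iff_not]
        intro hc
        exact this ⟨hcov.1, hcov.2, hc.1, hc.2⟩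
      rw [hrest]
      rw [hget, if_pos hcov, if_pos (by simpa using hcov)]
      simp
    · rw [if_neg (by simpa using hcov)]
      cases hfi : rest.findIdx? (fun q => decide (q.1 ≤ t ∧ t ≤ q.2)) with
      | none =>
        simp only [Option.map_none]
        rw [hget, if_neg hcov]
      | some k =>
        simp only [Option.map_some]
        congr 1
        push_cast
        ring_nf

-- set(xs) has exactly one element iff every element of xs equals the first
theorem pv_ofList_len_one (x : Int) (xs : List Int) :
    (PySem.Set.ofList (x :: xs)).length = 1 ↔ ∀ y ∈ xs, y = x := by
  rw [PySem.Set.ofList_cons]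
  simp only [List.length_cons, Nat.add_eq_one_iff]
  constructor
  · intro h y hy
    have hnil : (PySem.Set.ofList xs).discard x = [] := by
      apply List.eq_nil_of_length_eq_zero
      omega
    by_contra hne
    have : y ∈ (PySem.Set.ofList xs).discard x :=
      (PySem.Set.mem_discard _ _ _).mpr ⟨(PySem.Set.mem_ofList _ _).mpr hy, hne⟩
    rw [hnil] at this
    exact absurd this (List.not_mem_nil)
  · intro h
    have hnil : (PySem.Set.ofList xs).discard x = [] := by
      apply List.eq_nil_iff_forall_not_mem.mpr
      intro y hy
      rcases (PySem.Set.mem_discard _ _ _).mp hy with ⟨h1, h2⟩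
      exact h2 (h y ((PySem.Set.mem_ofList _ _).mp h1))
    simp [hnil]

-- with pairwise-disjoint spans, a span covering t is THE span findIdx? reports
theorem pv_findIdx_cover (l : List (Int × Int))
    (hpw : l.Pairwise (fun p q => ∀ u : Int, ¬(p.1 ≤ u ∧ u ≤ p.2 ∧ q.1 ≤ u ∧ u ≤ q.2)))
    (k : Nat) (hk : k < l.length) (t : Int) (hcov : l[k].1 ≤ t ∧ t ≤ l[k].2) :
    l.findIdx? (fun q => decide (q.1 ≤ t ∧ t ≤ q.2)) = some k := by
  rw [List.findIdx?_eq_some_iff_getElem]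
  refine ⟨hk, by simpa using hcov, ?_⟩
  intro j hj
  have hrel := List.pairwise_iff_getElem.mp hpw j k (by omega) hk hj
  simp only [decide_eq_true_eq]
  intro hcj
  exact hrel t ⟨hcj.1, hcj.2, hcov.1, hcov.2⟩

-- a slice of the token array is the list of its reads over the index range
theorem pv_slice_eq_map (xs : List Int) (a b : Int) (h0 : 0 ≤ a) (hb0 : 0 ≤ b)
    (hb : b ≤ (xs.length : Int)) :
    PySem.List.slice xs (some a) (some b) =
      (PySem.List.pyRange a b 1).map (fun j => PySem.List.pyGetD xs j (-2)) := by
  rw [PySem.List.slice_toNat xs h0 hb0]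
  apply List.ext_getElem
  · simp [PySem.List.length_pyRange_one]
    omega
  · intro i h1 h2
    simp only [List.getElem_take, List.getElem_drop, List.getElem_map,
      PySem.List.getElem_pyRange_one]
    rw [PySem.List.pyGetD_eq_getElem _ _ (by
        simp [PySem.List.length_pyRange_one] at h2
        omega) (by
        simp [PySem.List.length_pyRange_one] at h2
        omega)]
    congr 1
    simp [PySem.List.length_pyRange_one] at h2
    omega

-- A's nested-mode per-candidate test equals B's three interval tests
theorem pv_keep_nested (sel : List (Int × Int)) (s2m e2m : PySem.Dict Int Int) (T : List Int)
    (hs2m : ∀ tok K : Int, K < s2m.getD tok (-1) ↔ (K < -1 ∨ ∃ q ∈ sel, q.1 = tok ∧ K < q.2))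
    (he2m : ∀ tok K : Int, (0 ≤ e2m.getD tok (-1) ∧ e2m.getD tok (-1) < K) ↔ ∃ q ∈ sel, q.2 = tok ∧ q.1 < K)
    (hT : ∀ t : Int, 0 ≤ t → t < (T.length : Int) →
      PySem.List.pyGet? T t = some (match sel.findIdx? (fun q => decide (q.1 ≤ t ∧ t ≤ q.2)) with
        | some k => (k : Int) | none => -1))
    (hpw : sel.Pairwise (fun p q => ∀ u : Int, ¬(p.1 ≤ u ∧ u ≤ p.2 ∧ q.1 ≤ u ∧ u ≤ q.2)))
    (hsel0 : ∀ q ∈ sel, 0 ≤ q.1)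
    (hselE : ∀ q ∈ sel, q.2 < (T.length : Int))
    (selSet : PySem.Set Int)
    (c_s c_e : Int) (hcs : 0 ≤ c_s) (hce : 0 ≤ c_e) (hceT : c_e < (T.length : Int)) :
    pvAKeep true s2m e2m selSet T c_s c_e =
      !(sel.any (fun q => decide (c_s < q.1 ∧ q.1 ≤ c_e ∧ c_e < q.2)) ||
        sel.any (fun q => decide (q.1 < c_s ∧ c_s ≤ q.2 ∧ q.2 < c_e)) ||
        sel.any (fun q => decide (q.1 ≤ c_s ∧ c_s ≤ c_e ∧ c_e ≤ q.2 ∧ (q.1 < c_s ∨ c_e < q.2)))) := by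
  -- reading T through pyGetD and through pyGet? agree in range
  have hgd : ∀ t : Int, 0 ≤ t → t < (T.length : Int) →
      PySem.List.pyGet? T t = some (PySem.List.pyGetD T t (-2)) := by
    intro t h0 h1
    rw [PySem.List.pyGet?_of_nonneg _ h0, PySem.List.pyGetD_eq_getElem _ _ h0 h1]
    exact List.getElem?_eq_getElem (by omega)
  have hv : ∀ t : Int, 0 ≤ t → t < (T.length : Int) →
      PySem.List.pyGetD T t (-2) = (match sel.findIdx? (fun q => decide (q.1 ≤ t ∧ t ≤ q.2)) with
        | some k => (k : Int) | none => -1) := by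
    intro t h0 h1
    have h2 := hT t h0 h1
    rw [hgd t h0 h1] at h2
    exact Option.some.inj h2
  simp only [pvAKeep, if_true]
  have hcross1 : ((PySem.List.pyRange c_s (c_e + 1) 1).any (fun tok =>
      (decide (tok > c_s) && decide (s2m.getD tok (-1) > c_e)) ||
      (decide (tok < c_e) && (decide (0 ≤ e2m.getD tok (-1)) && decide (e2m.getD tok (-1) < c_s))))) =
      (sel.any (fun q => decide (c_s < q.1 ∧ q.1 ≤ c_e ∧ c_e < q.2)) ||
       sel.any (fun q => decide (q.1 < c_s ∧ c_s ≤ q.2 ∧ q.2 < c_e))) := by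
    rw [Bool.eq_iff_iff]
    simp only [List.any_eq_true, Bool.or_eq_true, PySem.List.mem_pyRange_one,
      decide_eq_true_eq, Bool.and_eq_true, gt_iff_lt]
    constructor
    · rintro ⟨tok, ⟨h1, h2⟩, ⟨hgt, hmax⟩ | ⟨hlt, hge, hlt2⟩⟩
      · rcases (hs2m tok c_e).mp hmax with h | ⟨q, hq, hq1, hq2⟩
        · omega
        · exact Or.inl ⟨q, hq, by omega⟩
      · rcases (he2m tok c_s).mp ⟨hge, hlt2⟩ with ⟨q, hq, hq2, hq1⟩
        exact Or.inr ⟨q, hq, by omega⟩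
    · rintro (⟨q, hq, hh⟩ | ⟨q, hq, hh⟩)
      · exact ⟨q.1, ⟨by omega, by omega⟩,
          Or.inl ⟨by omega, (hs2m q.1 c_e).mpr (Or.inr ⟨q, hq, rfl, by omega⟩)⟩⟩
      · exact ⟨q.2, ⟨by omega, by omega⟩,
          Or.inr ⟨by omega, ((he2m q.2 c_s).mpr ⟨q, hq, rfl, by omega⟩).1,
                  ((he2m q.2 c_s).mpr ⟨q, hq, rfl, by omega⟩).2⟩⟩
  rw [hcross1]
  have hcond3 : (if (PySem.Set.ofList (PySem.List.slice T (some c_s) (some (c_e + 1)))).length = 1 ∧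
        (PySem.List.pyGet? T c_s).getD (-2) ≠ -1 then
        (decide (c_s > 0) &&
          decide ((PySem.List.pyGet? T (c_s - 1)).getD (-2) = (PySem.List.pyGet? T c_s).getD (-2))) ||
        (decide (c_e < PySem.List.len T - 1) &&
          decide ((PySem.List.pyGet? T (c_e + 1)).getD (-2) = (PySem.List.pyGet? T c_e).getD (-2)))
      else false) =
      sel.any (fun q => decide (q.1 ≤ c_s ∧ c_s ≤ c_e ∧ c_e ≤ q.2 ∧ (q.1 < c_s ∨ c_e < q.2))) := by
    rw [Bool.eq_iff_iff]
    simp only [List.any_eq_true, decide_eq_true_eq]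
    constructor
    · intro h
      split at h
      case isFalse => exact absurd h (by simp)
      case isTrue hU =>
        -- the slice is nonempty, so c_s ≤ c_e
        have hcse : c_s ≤ c_e := by
          by_contra hgt
          have : PySem.List.slice T (some c_s) (some (c_e + 1)) = [] := by
            rw [PySem.List.slice_toNat T hcs (by omega)]
            rw [show ((c_e + 1).toNat - c_s.toNat) = 0 from by omega]
            simp
          rw [this] at hU
          simp [PySem.Set.ofList] at hU
        have hcsT : c_s < (T.length : Int) := by omega
        -- the value at c_s names a span index k
        obtain ⟨k, hfi⟩ : ∃ k, sel.findIdx? (fun q => decide (q.1 ≤ c_s ∧ c_s ≤ q.2)) = some k := by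
          cases hfi : sel.findIdx? (fun q => decide (q.1 ≤ c_s ∧ c_s ≤ q.2)) with
          | none =>
            exfalso
            have := hv c_s hcs hcsT
            rw [hfi] at this
            rw [hgd c_s hcs hcsT] at hU
            simp only [Option.getD_some] at hU
            exact hU.2 (by rw [this])
          | some k => exact ⟨k, rfl⟩
        obtain ⟨hk, hpk, -⟩ := List.findIdx?_eq_some_iff_getElem.mp hfi
        simp only [decide_eq_true_eq] at hpk
        -- every value in the slice equals the one at c_s
        have hall : ∀ t ∈ PySem.List.pyRange (c_s + 1) (c_e + 1) 1,
            PySem.List.pyGetD T t (-2) = PySem.List.pyGetD T c_s (-2) := by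
          have hU1 := hU.1
          rw [pv_slice_eq_map T c_s (c_e + 1) hcs (by omega) (by omega),
            PySem.List.pyRange_one_cons (by omega), List.map_cons] at hU1
          intro t ht
          have := (pv_ofList_len_one _ _).mp hU1 (PySem.List.pyGetD T t (-2)) (List.mem_map.mpr ⟨t, ht, rfl⟩)
          exact this
        have hvcs : PySem.List.pyGetD T c_s (-2) = (k : Int) := by
          rw [hv c_s hcs hcsT, hfi]
        -- every token of [c_s, c_e] is covered by span k
        have hcovAll : ∀ t : Int, c_s ≤ t → t ≤ c_e →
            sel.findIdx? (fun q => decide (q.1 ≤ t ∧ t ≤ q.2)) = some k := by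
          intro t h1 h2
          by_cases hteq : t = c_s
          · subst hteq; exact hfi
          · have hmem : t ∈ PySem.List.pyRange (c_s + 1) (c_e + 1) 1 :=
              (PySem.List.mem_pyRange_one).mpr (by omega)
            have heq := hall t hmem
            rw [hvcs] at heq
            rw [hv t (by omega) (by omega)] at heq
            cases hfit : sel.findIdx? (fun q => decide (q.1 ≤ t ∧ t ≤ q.2)) with
            | none => rw [hfit] at heq; dsimp only at heq; omega
            | some k' =>
              rw [hfit] at heq
              dsimp only at heq
              have : k' = k := by exact_mod_cast heq
              rw [this]
          
        have hcovTok : ∀ t : Int, c_s ≤ t → t ≤ c_e → sel[k].1 ≤ t ∧ t ≤ sel[k].2 := by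
          intro t h1 h2
          obtain ⟨hk', hp, -⟩ := List.findIdx?_eq_some_iff_getElem.mp (hcovAll t h1 h2)
          simpa using hp
        have hq2 : c_e ≤ sel[k].2 := by
          by_contra hlt
          have hcov2 := hcovTok (sel[k].2 + 1) (by have := (hcovTok c_s le_rfl hcse).2; omega) (by omega)
          omega
        refine ⟨sel[k], List.getElem_mem hk, hpk.1, hcse, hq2, ?_⟩
        -- the adjacency test: the neighbouring token lies in the same span
        rcases (Bool.or_eq_true _ _).mp h with hL | hR
        · simp only [Bool.and_eq_true, decide_eq_true_eq] at hL
          obtain ⟨hpos, heq⟩ := hL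
          left
          rw [hgd (c_s - 1) (by omega) (by omega), hgd c_s hcs hcsT] at heq
          simp only [Option.getD_some] at heq
          rw [hv (c_s - 1) (by omega) (by omega), hvcs] at heq
          cases hfit : sel.findIdx? (fun q => decide (q.1 ≤ c_s - 1 ∧ c_s - 1 ≤ q.2)) with
          | none => rw [hfit] at heq; dsimp only at heq; omega
          | some k' =>
            rw [hfit] at heq
            dsimp only at heq
            have hk'k : k' = k := by exact_mod_cast heq
            subst hk'k
            obtain ⟨hk', hp, -⟩ := List.findIdx?_eq_some_iff_getElem.mp hfit
            simp only [decide_eq_true_eq] at hp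
            omega
        · simp only [Bool.and_eq_true, decide_eq_true_eq, PySem.List.len_eq] at hR
          obtain ⟨hpos, heq⟩ := hR
          right
          have hvce : PySem.List.pyGetD T c_e (-2) = (k : Int) := by
            rw [hv c_e hce hceT, hcovAll c_e hcse le_rfl]
          rw [hgd (c_e + 1) (by omega) (by omega), hgd c_e hce hceT] at heq
          simp only [Option.getD_some] at heq
          rw [hv (c_e + 1) (by omega) (by omega), hvce] at heq
          cases hfit : sel.findIdx? (fun q => decide (q.1 ≤ c_e + 1 ∧ c_e + 1 ≤ q.2)) with
          | none => rw [hfit] at heq; dsimp only at heq; omega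
          | some k' =>
            rw [hfit] at heq
            dsimp only at heq
            have hk'k : k' = k := by exact_mod_cast heq
            subst hk'k
            obtain ⟨hk', hp, -⟩ := List.findIdx?_eq_some_iff_getElem.mp hfit
            simp only [decide_eq_true_eq] at hp
            omega
    · rintro ⟨q, hq, h1, h2, h3, h4⟩
      obtain ⟨k, hk, hselk⟩ := List.mem_iff_getElem.mp hq
      have hfiAll : ∀ t : Int, q.1 ≤ t → t ≤ q.2 →
          sel.findIdx? (fun r => decide (r.1 ≤ t ∧ t ≤ r.2)) = some k :=
        fun t ha hb => pv_findIdx_cover sel hpw k hk t (by rw [hselk]; exact ⟨ha, hb⟩)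
      have hq0 : 0 ≤ q.1 := hsel0 q hq
      have hqE : q.2 < (T.length : Int) := hselE q hq
      have hvt : ∀ t : Int, c_s ≤ t → t ≤ c_e → PySem.List.pyGetD T t (-2) = (k : Int) := by
        intro t ha hb
        rw [hv t (by omega) (by omega), hfiAll t (by omega) (by omega)]
      have hU : (PySem.Set.ofList (PySem.List.slice T (some c_s) (some (c_e + 1)))).length = 1 ∧
          (PySem.List.pyGet? T c_s).getD (-2) ≠ -1 := by
        constructor
        · rw [pv_slice_eq_map T c_s (c_e + 1) hcs (by omega) (by omega),
            PySem.List.pyRange_one_cons (by omega), List.map_cons]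
          rw [pv_ofList_len_one]
          intro y hy
          obtain ⟨t, ht, rfl⟩ := List.mem_map.mp hy
          rw [PySem.List.mem_pyRange_one] at ht
          rw [hvt t (by omega) (by omega), hvt c_s le_rfl h2]
        · rw [hgd c_s hcs (by omega)]
          simp only [Option.getD_some]
          rw [hvt c_s le_rfl h2]
          omega
      rw [if_pos hU]
      rcases h4 with h4 | h4
      · refine (Bool.or_eq_true _ _).mpr (Or.inl ?_)
        simp only [Bool.and_eq_true, decide_eq_true_eq]
        refine ⟨by omega, ?_⟩
        rw [hgd (c_s - 1) (by omega) (by omega), hgd c_s hcs (by omega)]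
        simp only [Option.getD_some]
        rw [hvt c_s le_rfl h2, hv (c_s - 1) (by omega) (by omega),
          hfiAll (c_s - 1) (by omega) (by omega)]
      · refine (Bool.or_eq_true _ _).mpr (Or.inr ?_)
        simp only [Bool.and_eq_true, decide_eq_true_eq, PySem.List.len_eq]
        refine ⟨by omega, ?_⟩
        rw [hgd (c_e + 1) (by omega) (by omega), hgd c_e hce hceT]
        simp only [Option.getD_some]
        rw [hvt c_e (by omega) le_rfl, hv (c_e + 1) (by omega) (by omega),
          hfiAll (c_e + 1) (by omega) (by omega)]
  rw [hcond3]
  cases h12 : (sel.any (fun q => decide (c_s < q.1 ∧ q.1 ≤ c_e ∧ c_e < q.2)) ||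
      sel.any (fun q => decide (q.1 < c_s ∧ c_s ≤ q.2 ∧ q.2 < c_e))) <;> simp

-- the four-component loop state is four independent folds
theorem pv_split (an : Bool) (lp : List (Int × (Int × Int))) (t0 : List Int) :
    lp.foldl (fun st p => (pvAStepSME an st.1 p.2, pvAStepEMS an st.2.1 p.2,
        pvAStepSel an st.2.2.1 p.2, pvAStepToki an st.2.2.2 p))
      (PySem.Dict.empty, PySem.Dict.empty, PySem.Set.empty, t0) =
    (lp.foldl (fun d p => pvAStepSME an d p.2) PySem.Dict.empty,
     lp.foldl (fun d p => pvAStepEMS an d p.2) PySem.Dict.empty,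
     lp.foldl (fun s p => pvAStepSel an s p.2) PySem.Set.empty,
     lp.foldl (fun t p => pvAStepToki an t p) t0) := by
  rw [PySem.List.foldl_prod_mk (f := fun d p => pvAStepSME an d p.2)
      (g := fun (s : PySem.Dict Int Int × PySem.Set Int × List Int) p =>
        (pvAStepEMS an s.1 p.2, pvAStepSel an s.2.1 p.2, pvAStepToki an s.2.2 p)),
    PySem.List.foldl_prod_mk (f := fun d p => pvAStepEMS an d p.2)
      (g := fun (s : PySem.Set Int × List Int) p => (pvAStepSel an s.1 p.2, pvAStepToki an s.2 p)),
    PySem.List.foldl_prod_mk (f := fun s p => pvAStepSel an s p.2)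
      (g := fun t p => pvAStepToki an t p)]

theorem remove_overlap_batch_spec : Claim_equal_remove_overlap_batch := by
  intro cs ce ss se an _hDom hPre
  unfold Spec_remove_overlap_batch
  by_cases h0 : cs = [] ∨ ss = []
  · simp only [remove_overlap_batch, remove_overlap_batch_alt, if_pos h0]
  · rcases hPre with h | ⟨hce, hse, hnest⟩
    · exact absurd h h0
    simp only [remove_overlap_batch, remove_overlap_batch_alt, if_neg h0]
    obtain ⟨mce, hmce⟩ := pv_max?_isSome ce hce
    obtain ⟨mse, hmse⟩ := pv_max?_isSome se hse
    rw [hmce, hmse]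
    simp only [Option.getD_some]
    -- split the four-component loop state into four independent folds
    simp only [pv_split]
    -- folds whose step ignores the enumeration index are folds over the zipped list
    have hdrop : ∀ {σ : Type} (g : σ → (Int × Int) → σ) (init : σ),
        (PySem.List.enumerate (List.zip ss se) 0).foldl (fun a p => g a p.2) init =
          (List.zip ss se).foldl g init := by
      intro σ g init
      have h1 : (PySem.List.enumerate (List.zip ss se) 0).map (fun p => p.2) = List.zip ss se :=
        PySem.List.map_snd_enumerate _ _
      conv_rhs => rw [← h1]
      rw [List.foldl_map]
    cases an with
    | false =>
      apply PySem.List.foldl_congr_mem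
      intro acc p hp
      dsimp only
      have hkeep : pvAKeep false
          ((PySem.List.enumerate (List.zip ss se) 0).foldl (fun d p => pvAStepSME false d p.2) PySem.Dict.empty)
          ((PySem.List.enumerate (List.zip ss se) 0).foldl (fun d p => pvAStepEMS false d p.2) PySem.Dict.empty)
          ((PySem.List.enumerate (List.zip ss se) 0).foldl (fun s p => pvAStepSel false s p.2) PySem.Set.empty)
          ((PySem.List.enumerate (List.zip ss se) 0).foldl (fun t p => pvAStepToki false t p) (List.replicate (max mce mse + 1).toNat (-1)))
          p.1 p.2 =
          !((List.zip ss se).any (fun q => decide (q.1 ≤ p.2 ∧ p.1 ≤ q.2 ∧ q.1 ≤ q.2 ∧ p.1 ≤ p.2))) := by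
        simp only [pvAKeep, Bool.false_eq_true, if_false]
        congr 1
        rw [hdrop (fun s q => pvAStepSel false s q) PySem.Set.empty]
        have hsel : (List.zip ss se).foldl (fun s q => pvAStepSel false s q) PySem.Set.empty =
            (List.zip ss se).foldl (fun s q => PySem.Set.update s (PySem.List.pyRange q.1 (q.2 + 1) 1)) PySem.Set.empty := by
          simp [pvAStepSel]
        rw [hsel, Bool.eq_iff_iff]
        simp only [List.any_eq_true, PySem.List.mem_pyRange_one, decide_eq_true_eq,
          PySem.Set.contains_iff]
        constructor
        · rintro ⟨tok, ⟨h1, h2⟩, hmem⟩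
          rcases (pv_mem_selSet _ _ _).mp hmem with h | ⟨q, hq, hq1, hq2⟩
          · simp [PySem.Set.empty] at h
          · exact ⟨q, hq, by omega⟩
        · rintro ⟨q, hq, hh⟩
          exact ⟨max p.1 q.1, ⟨by omega, by omega⟩,
            (pv_mem_selSet _ _ _).mpr (Or.inr ⟨q, hq, by omega, by omega⟩)⟩
      rw [hkeep]
      simp
    | true =>
      obtain ⟨hcs0, hce0, hss0, hse0, hpwA⟩ := hnest rfl
      obtain ⟨y, hy⟩ := List.exists_mem_of_ne_nil se hse
      have hmse0 : 0 ≤ mse := le_trans (hse0 y hy) (PySem.List.max?_isMax hmse y hy)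
      have hmceIs : ∀ x ∈ ce, x ≤ mce := fun x hx => PySem.List.max?_isMax hmce x hx
      have hmseIs : ∀ x ∈ se, x ≤ mse := fun x hx => PySem.List.max?_isMax hmse x hx
      have hsel0 : ∀ q ∈ List.zip ss se, 0 ≤ q.1 := by
        intro q hq
        exact hss0 q.1 (List.of_mem_zip hq).1
      have hpw' : (List.zip ss se).Pairwise
          (fun p q => ∀ u : Int, ¬(p.1 ≤ u ∧ u ≤ p.2 ∧ q.1 ≤ u ∧ u ≤ q.2)) := by
        refine hpwA.imp ?_
        intro p q h u
        omega
      have hlenR : ((List.replicate (max mce mse + 1).toNat (-1 : Int)).length : Int) = max mce mse + 1 := by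
        simp only [List.length_replicate]
        omega
      -- the final token array and its length
      have hlenT : (((PySem.List.enumerate (List.zip ss se) 0).foldl (fun t p => pvAStepToki true t p)
          (List.replicate (max mce mse + 1).toNat (-1 : Int))).length : Int) = max mce mse + 1 := by
        rw [pv_len_toki]
        exact hlenR
      have hT : ∀ t : Int, 0 ≤ t → t < max mce mse + 1 →
          PySem.List.pyGet? ((PySem.List.enumerate (List.zip ss se) 0).foldl (fun t p => pvAStepToki true t p)
            (List.replicate (max mce mse + 1).toNat (-1 : Int))) t =
          some (match (List.zip ss se).findIdx? (fun q => decide (q.1 ≤ t ∧ t ≤ q.2)) with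
            | some k => (k : Int) | none => -1) := by
        intro t h1 h2
        rw [pv_toki_char (List.zip ss se) 0 _ t h1 (by omega) hsel0 hpw']
        cases hfi : (List.zip ss se).findIdx? (fun q => decide (q.1 ≤ t ∧ t ≤ q.2)) with
        | some k => dsimp only; rw [Int.zero_add]
        | none =>
          dsimp only
          rw [PySem.List.pyGet?_of_nonneg _ h1, List.getElem?_replicate, if_pos (by omega)]
      -- the two dictionaries
      have hs2m : ∀ tok K : Int,
          K < ((PySem.List.enumerate (List.zip ss se) 0).foldl (fun d p => pvAStepSME true d p.2) PySem.Dict.empty).getD tok (-1) ↔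
          (K < -1 ∨ ∃ q ∈ List.zip ss se, q.1 = tok ∧ K < q.2) := by
        intro tok K
        rw [hdrop (fun d q => pvAStepSME true d q) PySem.Dict.empty]
        have heq : (List.zip ss se).foldl (fun d q => pvAStepSME true d q) PySem.Dict.empty =
            (List.zip ss se).foldl (fun d q => if q.2 > d.getD q.1 (-1) then d.insert q.1 q.2 else d) PySem.Dict.empty := by
          simp [pvAStepSME]
        rw [heq, pv_dmax_char, PySem.Dict.getD_empty]
      have he2m : ∀ tok K : Int,
          (0 ≤ ((PySem.List.enumerate (List.zip ss se) 0).foldl (fun d p => pvAStepEMS true d p.2) PySem.Dict.empty).getD tok (-1) ∧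
           ((PySem.List.enumerate (List.zip ss se) 0).foldl (fun d p => pvAStepEMS true d p.2) PySem.Dict.empty).getD tok (-1) < K) ↔
          ∃ q ∈ List.zip ss se, q.2 = tok ∧ q.1 < K := by
        intro tok K
        rw [hdrop (fun d q => pvAStepEMS true d q) PySem.Dict.empty]
        have heq : (List.zip ss se).foldl (fun d q => pvAStepEMS true d q) PySem.Dict.empty =
            (List.zip ss se).foldl (fun d q => if d.getD q.2 (-1) = -1 ∨ q.1 < d.getD q.2 (-1) then d.insert q.2 q.1 else d) PySem.Dict.empty := by
          simp [pvAStepEMS]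
        rw [heq, pv_dmin_char _ _ _ _ hsel0 (by intro z; rw [PySem.Dict.getD_empty])]
        rw [PySem.Dict.getD_empty]
        constructor
        · rintro (h | h)
          · omega
          · exact h
        · intro h
          exact Or.inr h
      apply PySem.List.foldl_congr_mem
      intro acc p hp
      dsimp only
      have hmem := List.of_mem_zip hp
      have hkeep := pv_keep_nested (List.zip ss se) _ _ _
        hs2m he2m
        (by intro t h1 h2; exact hT t h1 (by omega))
        hpw' hsel0
        (by intro q hq
            have := hmseIs q.2 (List.of_mem_zip hq).2
            omega)
        ((PySem.List.enumerate (List.zip ss se) 0).foldl (fun s p => pvAStepSel true s p.2) PySem.Set.empty)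
        p.1 p.2 (hcs0 p.1 hmem.1) (hce0 p.2 hmem.2)
        (by have := hmceIs p.2 hmem.2; omega)
      rw [hkeep]
      simp
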